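-- pv_equiv track=rewrite | github.com/gtrivedi88/content-editorial-assistant | rules/structure_and_format/procedures_rule.py | _detect_procedural_patterns
-- ===== SOURCE A (Python) =====
-- def _detect_procedural_patterns(text: str) -> bool:
--     """
--     Detect procedural content based on text patterns.
--     """
--     text_lower = text.lower()
--
--     # Pattern 1: Sequential numbered/bulleted lists that look like steps
--     if any(pattern in text_lower for pattern in [
--         'first', 'second', 'third', 'next', 'then', 'finally',
--         'step 1', 'step 2', 'step 3', '1.', '2.', '3.',
--         'install', 'configure', 'setup', 'download', 'uninstall'
--     ]):
--         return True
--
--     # Pattern 2: Imperative/instructional language patterns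
--     instructional_patterns = [
--         'should be', 'must be', 'need to', 'have to',
--         'downloading', 'configuration', 'installation',
--         'updating', 'setting', 'creating', 'removing'
--     ]
--
--     if any(pattern in text_lower for pattern in instructional_patterns):
--         return True
--
--     return False
-- ===== SOURCE B (Python) =====
-- # All patterns kept in one '|'-joined bank, split once at import time.
-- _PATTERNS = (
--     'first|second|third|next|then|finally|'
--     'step 1|step 2|step 3|1.|2.|3.|'
--     'install|configure|setup|download|uninstall|'
--     'should be|must be|need to|have to|'
--     'downloading|configuration|installation|'
--     'updating|setting|creating|removing'
-- ).split('|')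
--
--
-- def _detect_procedural_patterns(text: str) -> bool:
--     """Position-major scan: walk the lowercased text once left to right and
--     at each position test whether any pattern starts there."""
--     t = text.lower()
--     i = 0
--     n = len(t)
--     while i <= n:
--         for p in _PATTERNS:
--             if t.startswith(p, i):
--                 return True
--         i += 1
--     return False
-- ===== Notes on version B (the rewrite author's own statement) =====
-- stated objective: alternative
-- what changed: Replaces A's pattern-major sequence of full substring scans (one 'in' scan per pattern, in two staged groups) by a single position-major left-to-right walk over the lowercased text that tests all patterns (held in one split-once bank) at each position.
import Mathlib
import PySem

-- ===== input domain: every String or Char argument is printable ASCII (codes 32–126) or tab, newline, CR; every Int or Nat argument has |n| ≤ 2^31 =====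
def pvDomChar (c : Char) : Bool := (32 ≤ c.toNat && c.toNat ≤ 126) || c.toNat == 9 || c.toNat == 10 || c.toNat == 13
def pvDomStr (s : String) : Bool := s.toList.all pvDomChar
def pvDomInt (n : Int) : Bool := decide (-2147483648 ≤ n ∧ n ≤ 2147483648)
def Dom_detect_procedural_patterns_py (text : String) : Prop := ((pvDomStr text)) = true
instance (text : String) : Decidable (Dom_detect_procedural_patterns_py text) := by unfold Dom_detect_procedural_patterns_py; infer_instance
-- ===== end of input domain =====

-- B replaces A's pattern-major substring scans by one position-major left-to-right walk over the lowered text (alternative, same cost).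

-- ===== PORT A =====
-- the first literal pattern list in A
def pvPatterns1 : List (List Char) :=
  ["first".toList, "second".toList, "third".toList, "next".toList, "then".toList, "finally".toList,
   "step 1".toList, "step 2".toList, "step 3".toList, "1.".toList, "2.".toList, "3.".toList,
   "install".toList, "configure".toList, "setup".toList, "download".toList, "uninstall".toList]

-- instructional_patterns
def pvPatterns2 : List (List Char) :=
  ["should be".toList, "must be".toList, "need to".toList, "have to".toList,
   "downloading".toList, "configuration".toList, "installation".toList,
   "updating".toList, "setting".toList, "creating".toList, "removing".toList]

def detect_procedural_patterns_py (text : String) : Bool :=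
  let text_lower := PySem.Chars.lower text.toList
  if pvPatterns1.any (fun pattern => PySem.Chars.isIn pattern text_lower) then true
  else if pvPatterns2.any (fun pattern => PySem.Chars.isIn pattern text_lower) then true
  else false

-- ===== PORT B =====
-- Source B's single '|'-joined pattern bank, split once
def pvBank : List (List Char) :=
  ("first|second|third|next|then|finally|step 1|step 2|step 3|1.|2.|3.|install|configure|setup|download|uninstall|should be|must be|need to|have to|downloading|configuration|installation|updating|setting|creating|removing".toList).splitOn '|'

-- the while loop of Source B: at each suffix, test whether some pattern starts there, then advance
def pvScan : List Char → Bool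
  | [] => pvBank.any (fun p => PySem.Chars.startswith [] p)
  | c :: rest => pvBank.any (fun p => PySem.Chars.startswith (c :: rest) p) || pvScan rest

def detect_procedural_patterns_py_alt (text : String) : Bool :=
  pvScan (PySem.Chars.lower text.toList)

-- ===== PRECONDITION & SPEC =====
def Spec_detect_procedural_patterns_py (text : String) (out : Bool) : Prop := out = detect_procedural_patterns_py_alt text
instance (text : String) (out : Bool) : Decidable (Spec_detect_procedural_patterns_py text out) := by unfold Spec_detect_procedural_patterns_py; infer_instance

-- ===== CLAIM =====
def Claim_equal_detect_procedural_patterns_py : Prop := ∀ (text : String), Dom_detect_procedural_patterns_py text → Spec_detect_procedural_patterns_py text (detect_procedural_patterns_py text)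

-- ===== LEMMAS AND PROOFS =====

-- the suffix walk finds exactly the patterns that are a prefix of some suffix
theorem pvScan_iff (t : List Char) :
    pvScan t = true ↔ ∃ p ∈ pvBank, ∃ j, p <+: t.drop j := by
  induction t with
  | nil =>
    simp [pvScan, List.any_eq_true, PySem.Chars.startswith_iff, List.drop_nil]
  | cons c rest ih =>
    simp only [pvScan, Bool.or_eq_true, List.any_eq_true, PySem.Chars.startswith_iff, ih]
    constructor
    · rintro (⟨p, hp, hpre⟩ | ⟨p, hp, j, hpre⟩)
      · exact ⟨p, hp, 0, hpre⟩
      · exact ⟨p, hp, j + 1, by simpa using hpre⟩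
    · rintro ⟨p, hp, j, hpre⟩
      cases j with
      | zero => exact Or.inl ⟨p, hp, hpre⟩
      | succ j => exact Or.inr ⟨p, hp, j, by simpa using hpre⟩

-- the split-once bank is A's two pattern lists concatenated
set_option maxRecDepth 4000 in
theorem pvBank_eq : pvBank = pvPatterns1 ++ pvPatterns2 := by decide

-- ===== VERDICT =====
theorem detect_procedural_patterns_py_spec : Claim_equal_detect_procedural_patterns_py := by
  intro text _
  unfold Spec_detect_procedural_patterns_py detect_procedural_patterns_py detect_procedural_patterns_py_alt
  set t := PySem.Chars.lower text.toList with ht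
  have hb : pvScan t = (pvPatterns1 ++ pvPatterns2).any (fun p => PySem.Chars.isIn p t) := by
    rw [Bool.eq_iff_iff, pvScan_iff, ← pvBank_eq]
    simp only [List.any_eq_true]
    constructor
    · rintro ⟨p, hp, j, hpre⟩
      exact ⟨p, hp, (PySem.Chars.exists_prefix_drop_iff_isIn _ _).1 ⟨j, hpre⟩⟩
    · rintro ⟨p, hp, hin⟩
      obtain ⟨j, hpre⟩ := (PySem.Chars.exists_prefix_drop_iff_isIn _ _).2 hin
      exact ⟨p, hp, j, hpre⟩
  rw [hb, List.any_append]
  cases h1 : pvPatterns1.any (fun p => PySem.Chars.isIn p t) <;>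
  cases h2 : pvPatterns2.any (fun p => PySem.Chars.isIn p t) <;> simp [h1, h2]
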